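-- pv_equiv track=rewrite | github.com/jqm-das/mnist | mnist.py | find_greatest
-- ===== SOURCE A (Python) =====
-- def find_greatest(ls):
--     ind = 0
--     ls = ls[0]
--     for i in range(1,len(ls)):
--         if ls[i] > ls[ind]:
--             ind = i
--     for i in range(0,len(ls)):
--         if i == ind:
--             ls[i] = 1
--         else:
--             ls[i] = 0
--     return ls
-- ===== SOURCE B (Python) =====
-- def find_greatest(ls):
--     x = ls[0]
--     if not x:
--         return x
--
--     def best(lo, hi):
--         # first-occurrence argmax index of x[lo:hi) by a tournament:
--         # split the interval, recurse on both halves, ties go to the left half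
--         if hi - lo == 1:
--             return lo
--         mid = (lo + hi) // 2
--         i = best(lo, mid)
--         j = best(mid, hi)
--         return i if x[i] >= x[j] else j
--
--     idx = best(0, len(x))
--     x[:] = [int(k == idx) for k in range(len(x))]
--     return x
-- ===== Notes on version B (the rewrite author's own statement) =====
-- stated objective: alternative
-- what changed: Replaces A's linear tracking-argmax scan plus per-index branch-and-assign loop with a divide-and-conquer tournament over index intervals (recursively pick the winner of each half, ties to the left, giving the first-occurrence argmax) and a comprehension that rebuilds the row as the one-hot vector, spliced back in place.
-- outside the precondition, e.g. on find_greatest([]): A raises IndexError, B raises IndexError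
import Mathlib
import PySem

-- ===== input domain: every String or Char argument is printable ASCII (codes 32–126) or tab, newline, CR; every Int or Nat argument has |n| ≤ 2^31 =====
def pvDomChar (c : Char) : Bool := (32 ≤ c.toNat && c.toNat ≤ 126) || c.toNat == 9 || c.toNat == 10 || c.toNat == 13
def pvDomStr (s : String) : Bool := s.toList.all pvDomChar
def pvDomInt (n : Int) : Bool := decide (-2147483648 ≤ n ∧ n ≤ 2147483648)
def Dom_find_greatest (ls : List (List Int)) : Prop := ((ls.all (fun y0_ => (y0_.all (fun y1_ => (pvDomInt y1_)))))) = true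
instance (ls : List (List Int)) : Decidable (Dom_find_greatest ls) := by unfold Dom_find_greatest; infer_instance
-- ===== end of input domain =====

-- B replaces A's linear tracking-argmax scan + per-index branch loop by a divide-and-conquer
-- tournament over index intervals (ties to the left) and a one-hot comprehension; both mutate
-- ls[0] in place identically, the equivalence proved is about the return value.

-- ===== PORT A =====
def find_greatest (ls : List (List Int)) : List Int :=
  let x := ls.headD []          -- ls = ls[0]; IndexError on [] is excluded by Pre_
  let ind : Int := (PySem.List.pyRange 1 x.length 1).foldl
      (fun ind i => if PySem.List.pyGetD x i 0 > PySem.List.pyGetD x ind 0 then i else ind) 0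
  (PySem.List.pyRange 0 x.length 1).foldl
      (fun acc i => if i = ind then PySem.List.pySetD acc i 1 else PySem.List.pySetD acc i 0) x

-- ===== PORT B =====
-- best(lo, hi) of Source B; Python tests 'hi - lo == 1', the '≤ 1' guard only makes the
-- recursion total (it is equivalent on every reachable call, which has lo < hi)
def bestIdx (x : List Int) (lo hi : ℕ) : ℕ :=
  if hi - lo ≤ 1 then lo
  else
    let mid := (lo + hi) / 2
    let i := bestIdx x lo mid
    let j := bestIdx x mid hi
    if x.getD i 0 ≥ x.getD j 0 then i else j     -- i if x[i] >= x[j] else j (indices in range)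
termination_by hi - lo
decreasing_by all_goals omega

def find_greatest_alt (ls : List (List Int)) : List Int :=
  let x := ls.headD []          -- x = ls[0]; IndexError on [] is excluded by Pre_
  if x.isEmpty then x
  else
    let idx := bestIdx x 0 x.length
    (List.range x.length).map (fun k => if k = idx then (1 : Int) else 0)   -- [int(k == idx) for k in range(len(x))]

-- ===== PRECONDITION & SPEC =====
-- A raises IndexError on ls = [] (so does B); everything else is admitted.
def Pre_find_greatest (ls : List (List Int)) : Prop := ls ≠ []
instance (ls : List (List Int)) : Decidable (Pre_find_greatest ls) := by unfold Pre_find_greatest; infer_instance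
def pvWitness_find_greatest : List (List Int) := [[3, 7, 7, 1]]
def Spec_find_greatest (ls : List (List Int)) (out : List Int) : Prop := out = find_greatest_alt ls
instance (ls : List (List Int)) (out : List Int) : Decidable (Spec_find_greatest ls out) := by unfold Spec_find_greatest; infer_instance

-- ===== CLAIM (what is proved, stated in full; the proofs are below) =====
def Claim_equal_find_greatest : Prop := ∀ (ls : List (List Int)), Dom_find_greatest ls → Pre_find_greatest ls → Spec_find_greatest ls (find_greatest ls)

-- ===== LEMMAS AND PROOFS =====

-- FirstArgmax x j: j is the first index of the maximum of x
def FirstArgmax (x : List Int) (j : ℕ) : Prop :=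
  j < x.length ∧ (∀ k, k < x.length → x.getD k 0 ≤ x.getD j 0) ∧ (∀ k, k < j → x.getD k 0 < x.getD j 0)

theorem firstArgmax_unique {x : List Int} {i j : ℕ}
    (hi : FirstArgmax x i) (hj : FirstArgmax x j) : i = j := by
  rcases hi with ⟨hi1, hi2, hi3⟩
  rcases hj with ⟨hj1, hj2, hj3⟩
  rcases lt_trichotomy i j with h | h | h
  · exact absurd (hi2 j hj1) (not_le.mpr (hj3 i h))
  · exact h
  · exact absurd (hj2 i hi1) (not_le.mpr (hi3 j h))

-- A's first loop computes a FirstArgmax index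
theorem argmax_loop (x : List Int) (b : ℕ) (hb : b ≤ x.length) (hpos : 1 ≤ b) :
    ∃ j : ℕ, (PySem.List.pyRange 1 b 1).foldl
        (fun ind i => if PySem.List.pyGetD x i 0 > PySem.List.pyGetD x ind 0 then i else ind) 0
      = (j : Int) ∧ j < b ∧ (∀ k, k < b → x.getD k 0 ≤ x.getD j 0) ∧ (∀ k, k < j → x.getD k 0 < x.getD j 0) := by
  induction b with
  | zero => omega
  | succ b ih =>
    rcases Nat.eq_or_lt_of_le hpos with h1 | h1
    · refine ⟨0, ?_, ?_, ?_, ?_⟩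
      · rw [← h1]; simp [PySem.List.pyRange_one_eq_nil]
      · omega
      · intro k hk
        have hk0 : k = 0 := by omega
        subst hk0
        exact le_rfl
      · intro k hk; omega
    · have hb1 : 1 ≤ b := by omega
      obtain ⟨j, hj, hjb, hmax, hfirst⟩ := ih (by omega) hb1
      have hsplit : PySem.List.pyRange 1 (↑(b + 1)) 1
          = PySem.List.pyRange 1 (↑b) 1 ++ [(b : Int)] := by
        push_cast
        exact PySem.List.pyRange_one_succ_right (by exact_mod_cast hb1)
      rw [hsplit, List.foldl_append, hj]
      simp only [List.foldl_cons, List.foldl_nil]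
      by_cases hgt : PySem.List.pyGetD x (b : Int) 0 > PySem.List.pyGetD x (j : Int) 0
      · rw [if_pos hgt]
        have hgt' : x.getD j 0 < x.getD b 0 := by
          simpa [PySem.List.pyGetD_natCast] using hgt
        refine ⟨b, rfl, by omega, ?_, ?_⟩
        · intro k hk
          rcases Nat.lt_succ_iff_lt_or_eq.mp hk with h | h
          · exact le_of_lt (lt_of_le_of_lt (hmax k h) hgt')
          · simp [h]
        · intro k hk
          exact lt_of_le_of_lt (hmax k hk) hgt'
      · rw [if_neg hgt]
        have hle : x.getD b 0 ≤ x.getD j 0 := by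
          have := not_lt.mp hgt
          simpa [PySem.List.pyGetD_natCast] using this
        refine ⟨j, rfl, by omega, ?_, hfirst⟩
        intro k hk
        rcases Nat.lt_succ_iff_lt_or_eq.mp hk with h | h
        · exact hmax k h
        · simpa [h] using hle

-- B's tournament computes the first-occurrence argmax of each interval (ties go left)
theorem bestIdx_spec (x : List Int) (d : ℕ) : ∀ (lo hi : ℕ), hi - lo ≤ d → lo < hi → hi ≤ x.length →
    lo ≤ bestIdx x lo hi ∧ bestIdx x lo hi < hi ∧
    (∀ k, lo ≤ k → k < hi → x.getD k 0 ≤ x.getD (bestIdx x lo hi) 0) ∧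
    (∀ k, lo ≤ k → k < bestIdx x lo hi → x.getD k 0 < x.getD (bestIdx x lo hi) 0) := by
  induction d with
  | zero => intro lo hi hd hlt _; omega
  | succ d ih =>
    intro lo hi hd hlt hlen
    by_cases h1 : hi - lo ≤ 1
    · rw [bestIdx, if_pos h1]
      refine ⟨le_rfl, hlt, ?_, ?_⟩
      · intro k hk1 hk2
        have : k = lo := by omega
        subst this; exact le_rfl
      · intro k hk1 hk2; omega
    · rw [bestIdx, if_neg h1]
      simp only []
      set mid := (lo + hi) / 2 with hmid
      have hlomid : lo < mid := by omega
      have hmidhi : mid < hi := by omega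
      obtain ⟨hi1, hi2, hi3, hi4⟩ := ih lo mid (by omega) hlomid (by omega)
      obtain ⟨hj1, hj2, hj3, hj4⟩ := ih mid hi (by omega) hmidhi hlen
      set i := bestIdx x lo mid
      set j := bestIdx x mid hi
      by_cases hge : x.getD i 0 ≥ x.getD j 0
      · rw [if_pos hge]
        refine ⟨hi1, by omega, ?_, ?_⟩
        · intro k hk1 hk2
          by_cases hk : k < mid
          · exact hi3 k hk1 hk
          · exact le_trans (hj3 k (by omega) hk2) hge
        · intro k hk1 hk2
          exact hi4 k hk1 hk2
      · rw [if_neg hge]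
        have hlt' : x.getD i 0 < x.getD j 0 := lt_of_not_ge hge
        refine ⟨by omega, hj2, ?_, ?_⟩
        · intro k hk1 hk2
          by_cases hk : k < mid
          · exact le_of_lt (lt_of_le_of_lt (hi3 k hk1 hk) hlt')
          · exact hj3 k (by omega) hk2
        · intro k hk1 hk2
          by_cases hk : k < mid
          · exact lt_of_le_of_lt (hi3 k hk1 hk) hlt'
          · exact hj4 k (by omega) hk2

-- A's fill loop produces a one-hot map
theorem fill_loop (x : List Int) (f : Int → Int) (n : ℕ) (hn : n ≤ x.length) :
    (PySem.List.pyRange 0 (n : Int) 1).foldl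
        (fun acc i => PySem.List.pySetD acc i (f i)) x
      = (List.range n).map (fun k : Nat => f (k : Int)) ++ x.drop n := by
  induction n with
  | zero => simp
  | succ n ih =>
    have hsplit : PySem.List.pyRange 0 (↑(n + 1)) 1
        = PySem.List.pyRange 0 (↑n) 1 ++ [(n : Int)] := by
      push_cast
      exact PySem.List.pyRange_one_succ_right (by positivity)
    rw [hsplit, List.foldl_append, ih (by omega)]
    simp only [List.foldl_cons, List.foldl_nil, PySem.List.pySetD_natCast]
    have hlen : ((List.range n).map (fun k : Nat => f (k : Int))).length = n := by simp
    rw [List.set_append_right _ _ (by omega), hlen, Nat.sub_self]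
    have hdrop : x.drop n = x[n] :: x.drop (n + 1) :=
      List.drop_eq_getElem_cons (by omega)
    rw [hdrop, List.set_cons_zero, List.range_succ]
    simp

theorem find_greatest_spec : Claim_equal_find_greatest := by
  unfold Claim_equal_find_greatest
  intro ls _ hpre
  unfold Spec_find_greatest find_greatest find_greatest_alt
  simp only []
  set x := ls.headD [] with hx
  by_cases hxe : x = []
  · rw [hxe]
    simp
  · rw [if_neg (by simpa using hxe)]
    have hlen : 1 ≤ x.length := List.length_pos_iff.mpr hxe
    obtain ⟨j, hj, hjlt, hmax, hfirst⟩ := argmax_loop x x.length le_rfl hlen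
    have hAarg : FirstArgmax x j := ⟨hjlt, hmax, hfirst⟩
    obtain ⟨hb1, hb2, hb3, hb4⟩ := bestIdx_spec x x.length 0 x.length le_rfl hlen le_rfl
    have hBarg : FirstArgmax x (bestIdx x 0 x.length) :=
      ⟨hb2, fun k hk => hb3 k (Nat.zero_le k) hk, fun k hk => hb4 k (Nat.zero_le k) hk⟩
    have hjeq : j = bestIdx x 0 x.length := firstArgmax_unique hAarg hBarg
    have hbody : (fun (acc : List Int) (i : Int) =>
          if i = (j : Int) then PySem.List.pySetD acc i 1 else PySem.List.pySetD acc i 0)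
        = fun acc i => PySem.List.pySetD acc i (if i = (j : Int) then 1 else 0) := by
      funext acc i; split <;> rfl
    rw [hj, hbody, fill_loop x _ x.length le_rfl, List.drop_length, List.append_nil]
    apply List.map_congr_left
    intro k _
    rw [← hjeq]
    by_cases hke : k = j
    · simp [hke]
    · simp [hke]
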